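-- pv_equiv track=rewrite | github.com/kelvinblaser/EulerProject | Euler516.py | base_hamming_nums
-- ===== SOURCE A (Python) =====
-- def base_hamming_nums(b,N):
--     ''' Generates all numbers less than or equal to N of the form b * h
--     where h is a Hamming number.'''
--     x = b
--     while x <= N:
--         y = x
--         while y <= N:
--             z = y
--             while z <= N:
--                 yield z
--                 z *= 2
--             y *= 3
--         x *= 5
--     return
-- ===== SOURCE B (Python) =====
-- def base_hamming_nums(b, N):
--     ''' Generates all numbers less than or equal to N of the form b * h
--     where h is a Hamming number.'''
--     def gen(primes, start):
--         if not primes: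
--             yield start
--             return
--         m = start
--         while m <= N:
--             yield from gen(primes[1:], m)
--             m *= primes[0]
--     yield from gen([5, 3, 2], b)
-- ===== Notes on version B (the rewrite author's own statement) =====
-- stated objective: alternative
-- what changed: Replaces the three hardcoded nested while-loops by a single recursive generator over the prime list [5,3,2], yielding the same sequence in the same order.
import Mathlib
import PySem

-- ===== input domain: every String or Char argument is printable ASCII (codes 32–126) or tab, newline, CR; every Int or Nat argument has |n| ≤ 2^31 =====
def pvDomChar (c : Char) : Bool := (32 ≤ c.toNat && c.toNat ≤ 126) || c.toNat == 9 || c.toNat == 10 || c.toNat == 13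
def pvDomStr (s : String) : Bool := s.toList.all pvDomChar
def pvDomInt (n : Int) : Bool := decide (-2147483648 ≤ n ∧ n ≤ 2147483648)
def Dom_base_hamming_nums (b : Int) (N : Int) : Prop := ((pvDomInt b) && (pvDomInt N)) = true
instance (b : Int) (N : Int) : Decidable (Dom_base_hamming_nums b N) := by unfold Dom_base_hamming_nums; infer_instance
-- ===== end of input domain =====

-- B replaces A's three hardcoded nested while-loops by one recursive descent over the
-- prime list [5,3,2] (objective: alternative decomposition, same cost and output order).


-- ===== PORT A =====
-- Fuel (64) only makes the while-loops total; whenever the Python terminates (1 ≤ b or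
-- N < b) with |N| ≤ 2^31, each loop runs at most 32 iterations, so the guard never fires.
-- innermost loop: while z <= N: yield z; z *= 2
def pvLoopZ (N : Int) : Int → Nat → List Int
  | _, 0 => []
  | z, f + 1 => if z ≤ N then z :: pvLoopZ N (z * 2) f else []

-- middle loop: while y <= N: <z-loop>; y *= 3
def pvLoopY (N : Int) : Int → Nat → List Int
  | _, 0 => []
  | y, f + 1 => if y ≤ N then pvLoopZ N y 64 ++ pvLoopY N (y * 3) f else []

-- outer loop: while x <= N: <y-loop>; x *= 5
def pvLoopX (N : Int) : Int → Nat → List Int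
  | _, 0 => []
  | x, f + 1 => if x ≤ N then pvLoopY N x 64 ++ pvLoopX N (x * 5) f else []

def base_hamming_nums (b : Int) (N : Int) : List Int := pvLoopX N b 64

-- ===== PORT B =====
-- gen(primes, start): if primes empty yield start, else m = start; while m <= N:
-- yield from gen(primes[1:], m); m *= primes[0].  Same fuel guard (64) for each while.
def pvGen (N : Int) : List Int → Int → Nat → List Int
  | [], s, _ => [s]
  | _ :: _, _, 0 => []
  | p :: ps, s, f + 1 => if s ≤ N then pvGen N ps s 64 ++ pvGen N (p :: ps) (s * p) f else []
  termination_by primes _ f => (primes.length, f)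

def base_hamming_nums_alt (b : Int) (N : Int) : List Int := pvGen N [5, 3, 2] b 64

-- ===== PRECONDITION & SPEC =====
def Spec_base_hamming_nums (b : Int) (N : Int) (out : List Int) : Prop := out = base_hamming_nums_alt b N
instance (b : Int) (N : Int) (out : List Int) : Decidable (Spec_base_hamming_nums b N out) := by unfold Spec_base_hamming_nums; infer_instance

-- ===== CLAIM (what is proved, stated in full; the proofs are below) =====
def Claim_equal_base_hamming_nums : Prop := ∀ (b : Int) (N : Int), Dom_base_hamming_nums b N → Spec_base_hamming_nums b N (base_hamming_nums b N)

-- ===== LEMMAS AND PROOFS =====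
theorem pvGen_nil (N s : Int) (f : Nat) : pvGen N [] s f = [s] := by
  simp [pvGen]

theorem pvGen_cons_zero (N p : Int) (ps : List Int) (s : Int) : pvGen N (p :: ps) s 0 = [] := by
  simp [pvGen]

theorem pvGen_cons_succ (N p : Int) (ps : List Int) (s : Int) (f : Nat) :
    pvGen N (p :: ps) s (f + 1) =
      if s ≤ N then pvGen N ps s 64 ++ pvGen N (p :: ps) (s * p) f else [] := by
  rw [pvGen]

theorem pvLoopZ_eq_gen (N : Int) : ∀ (f : Nat) (z : Int), pvLoopZ N z f = pvGen N [2] z f := by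
  intro f
  induction f with
  | zero => intro z; simp [pvLoopZ, pvGen_cons_zero]
  | succ f ih =>
    intro z
    rw [pvLoopZ, pvGen_cons_succ, pvGen_nil, ih]
    simp

theorem pvLoopY_eq_gen (N : Int) : ∀ (f : Nat) (y : Int), pvLoopY N y f = pvGen N [3, 2] y f := by
  intro f
  induction f with
  | zero => intro y; simp [pvLoopY, pvGen_cons_zero]
  | succ f ih =>
    intro y
    rw [pvLoopY, pvGen_cons_succ, ih, pvLoopZ_eq_gen]

theorem pvLoopX_eq_gen (N : Int) : ∀ (f : Nat) (x : Int), pvLoopX N x f = pvGen N [5, 3, 2] x f := by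
  intro f
  induction f with
  | zero => intro x; simp [pvLoopX, pvGen_cons_zero]
  | succ f ih =>
    intro x
    rw [pvLoopX, pvGen_cons_succ, ih, pvLoopY_eq_gen]

-- ===== VERDICT (by name: the statement is the Claim_ definition above) =====
theorem base_hamming_nums_spec : Claim_equal_base_hamming_nums := by
  intro b N _
  unfold Spec_base_hamming_nums base_hamming_nums base_hamming_nums_alt
  exact pvLoopX_eq_gen N 64 b
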